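-- pv_equiv track=rewrite | github.com/wlgud0402/dailyalgo | codesignal/electionsWinners4.py | electionsWinners
-- ===== SOURCE A (Python) =====
-- def electionsWinners(votes, k):
--     votes.sort()
--     count = 0
--     if votes[-1]+k > votes[-2]:
--         count += 1
--     for i in range(len(votes)-1):
--         if votes[i] + k > votes[-1]:
--             count += 1
--     return count
-- ===== SOURCE B (Python) =====
-- def electionsWinners(votes, k):
--     # sorts votes in place (same side effect as the original)
--     votes.sort()
--     n = len(votes)
--     count = 1 if votes[-1] + k > votes[-2] else 0
--     target = votes[-1] - k
--     lo, hi = 0, n - 1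
--     while lo < hi:
--         mid = (lo + hi) // 2
--         if votes[mid] <= target:
--             lo = mid + 1
--         else:
--             hi = mid
--     return count + (n - 1 - lo)
-- ===== Notes on version B (the rewrite author's own statement) =====
-- stated objective: faster
-- what changed: The linear scan over the sorted prefix is replaced by a hand-written binary search for the first candidate that can beat the leader (votes[i]+k > max iff votes[i] > max-k on a sorted list), so the count becomes (n-1) - partition_point; the sort and the top-candidate check are kept.
import Mathlib
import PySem

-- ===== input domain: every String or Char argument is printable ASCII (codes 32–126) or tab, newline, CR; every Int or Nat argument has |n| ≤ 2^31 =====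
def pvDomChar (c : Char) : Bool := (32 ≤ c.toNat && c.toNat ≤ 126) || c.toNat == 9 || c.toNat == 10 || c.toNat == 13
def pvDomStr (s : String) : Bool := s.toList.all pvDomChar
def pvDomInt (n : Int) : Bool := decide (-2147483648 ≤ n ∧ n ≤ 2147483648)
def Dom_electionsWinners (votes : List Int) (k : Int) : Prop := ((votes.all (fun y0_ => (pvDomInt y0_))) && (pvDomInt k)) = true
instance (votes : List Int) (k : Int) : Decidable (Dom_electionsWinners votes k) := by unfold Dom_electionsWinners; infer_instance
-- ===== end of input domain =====

-- B replaces A's linear scan over the sorted prefix by a binary search (count = n-1 - partition point).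
-- Both versions sort the argument list in place in Python; the equivalence proved here is about the return value.

-- ===== PORT A =====
def electionsWinners (votes : List Int) (k : Int) : Int :=
  let s := PySem.List.sorted votes (fun x => x)
  let count : Int := if PySem.List.pyGetD s (-1) 0 + k > PySem.List.pyGetD s (-2) 0 then 1 else 0
  (PySem.List.pyRange 0 ((s.length : Int) - 1) 1).foldl
    (fun acc i => if PySem.List.pyGetD s i 0 + k > PySem.List.pyGetD s (-1) 0 then acc + 1 else acc)
    count

-- ===== PORT B =====
-- the hand-written while-loop binary search of Source B (lo/hi, Python '//' on the nonneg lo+hi is Nat division)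
def pvBsearch (s : List Int) (t : Int) (lo hi : Nat) : Nat :=
  if lo < hi then
    let mid := (lo + hi) / 2
    if PySem.List.pyGetD s (mid : Int) 0 ≤ t then pvBsearch s t (mid + 1) hi
    else pvBsearch s t lo mid
  else lo
termination_by hi - lo
decreasing_by all_goals omega

def electionsWinners_alt (votes : List Int) (k : Int) : Int :=
  let s := PySem.List.sorted votes (fun x => x)
  let n := s.length
  let count : Int := if PySem.List.pyGetD s (-1) 0 + k > PySem.List.pyGetD s (-2) 0 then 1 else 0
  let target := PySem.List.pyGetD s (-1) 0 - k
  let lo := pvBsearch s target 0 (n - 1)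
  count + ((n : Int) - 1 - (lo : Int))

-- ===== PRECONDITION & SPEC =====
-- A raises IndexError (votes[-1] / votes[-2]) on lists of fewer than two elements; B's own accesses raise there too.
def Pre_electionsWinners (votes : List Int) (k : Int) : Prop := 2 ≤ votes.length
instance (votes : List Int) (k : Int) : Decidable (Pre_electionsWinners votes k) := by unfold Pre_electionsWinners; infer_instance
def pvWitness_electionsWinners : List Int × Int := ([3, 1, 2], 1)

def Spec_electionsWinners (votes : List Int) (k : Int) (out : Int) : Prop := out = electionsWinners_alt votes k
instance (votes : List Int) (k : Int) (out : Int) : Decidable (Spec_electionsWinners votes k out) := by unfold Spec_electionsWinners; infer_instance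

-- ===== CLAIM (what is proved, stated in full; the proofs are below) =====
def Claim_equal_electionsWinners : Prop := ∀ (votes : List Int) (k : Int), Dom_electionsWinners votes k → Pre_electionsWinners votes k → Spec_electionsWinners votes k (electionsWinners votes k)

-- ===== LEMMAS AND PROOFS =====

-- A's counting loop over range(m) is countP of the m-element prefix.
lemma foldA_countP (s : List Int) (k L c : Int) :
    ∀ m : Nat, m ≤ s.length →
      (PySem.List.pyRange 0 (m : Int) 1).foldl
          (fun acc i => if PySem.List.pyGetD s i 0 + k > L then acc + 1 else acc) c
        = c + (((s.take m).countP (fun x => decide (L < x + k)) : Nat) : Int) := by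
  intro m
  induction m with
  | zero => simp
  | succ m ih =>
    intro hm
    have hm' : m < s.length := by omega
    have hcast : ((m + 1 : Nat) : Int) = (m : Int) + 1 := by push_cast; ring
    rw [hcast, PySem.List.pyRange_one_succ_right (Int.natCast_nonneg _), List.foldl_append]
    simp only [List.foldl_cons, List.foldl_nil]
    rw [ih (by omega)]
    rw [List.take_add_one, List.countP_append]
    have : s[m]? = some s[m] := List.getElem?_eq_getElem hm'
    rw [this]
    have hget : PySem.List.pyGetD s ((m : Nat) : Int) 0 = s[m] := by
      rw [PySem.List.pyGetD_natCast]
      exact List.getD_eq_getElem s 0 hm'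
    simp only [hget, Option.toList_some, List.countP_cons, List.countP_nil]
    by_cases h : L < s[m] + k
    · simp [h, gt_iff_lt]
      ring
    · simp [h, gt_iff_lt]

-- binary-search invariant: result r partitions the sorted list around t on [0, hi)
lemma pvBsearch_inv (s : List Int) (hs : s.Pairwise (· ≤ ·)) (t : Int) :
    ∀ (d lo hi : Nat), hi - lo = d → hi ≤ s.length → lo ≤ hi →
      (∀ j (hj : j < s.length), j < lo → s[j] ≤ t) →
      lo ≤ pvBsearch s t lo hi ∧ pvBsearch s t lo hi ≤ hi ∧
      (∀ j (hj : j < s.length), j < pvBsearch s t lo hi → s[j] ≤ t) ∧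
      (∀ j (hj : j < s.length), pvBsearch s t lo hi ≤ j → j < hi → t < s[j]) := by
  have hmono : ∀ i j (hi : i < s.length) (hj : j < s.length), i ≤ j → s[i] ≤ s[j] := by
    intro i j hi hj hij
    rcases Nat.eq_or_lt_of_le hij with h | h
    · subst h; rfl
    · exact (List.pairwise_iff_getElem.mp hs) i j hi hj h
  intro d
  induction d using Nat.strong_induction_on with
  | _ d ih =>
    intro lo hi hd hhi hlohi hlow
    by_cases h : lo < hi
    · have hmid1 : lo ≤ (lo + hi) / 2 := by omega
      have hmid2 : (lo + hi) / 2 < hi := by omega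
      have hmlt : (lo + hi) / 2 < s.length := by omega
      have hget : PySem.List.pyGetD s (((lo + hi) / 2 : Nat) : Int) 0 = s[(lo + hi) / 2] := by
        rw [PySem.List.pyGetD_natCast]
        exact List.getD_eq_getElem s 0 hmlt
      rw [pvBsearch, if_pos h]
      simp only [hget]
      by_cases hc : s[(lo + hi) / 2] ≤ t
      · rw [if_pos hc]
        have hlow' : ∀ j (hj : j < s.length), j < (lo + hi) / 2 + 1 → s[j] ≤ t := by
          intro j hj hjlt
          exact le_trans (hmono j ((lo + hi) / 2) hj hmlt (by omega)) hc
        have := ih (hi - ((lo + hi) / 2 + 1)) (by omega) ((lo + hi) / 2 + 1) hi rfl hhi (by omega) hlow'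
        exact ⟨by omega, this.2.1, this.2.2.1, this.2.2.2⟩
      · rw [if_neg hc]
        have := ih ((lo + hi) / 2 - lo) (by omega) lo ((lo + hi) / 2) rfl (by omega) (by omega) hlow
        refine ⟨this.1, by omega, this.2.2.1, ?_⟩
        intro j hj hrj hjhi
        by_cases hjm : j < (lo + hi) / 2
        · exact this.2.2.2 j hj hrj hjm
        · exact lt_of_lt_of_le (lt_of_not_ge hc) (hmono ((lo + hi) / 2) j hmlt hj (by omega))
    · rw [pvBsearch, if_neg h]
      exact ⟨le_refl _, by omega, fun j hj hjlo => hlow j hj hjlo, fun j hj hle hlt => by omega⟩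

-- countP of an m-element prefix that is false below r and true from r up to m
lemma countP_take_partition (s : List Int) (p : Int → Bool) (m r : Nat)
    (hm : m ≤ s.length) (hr : r ≤ m)
    (h1 : ∀ j (hj : j < s.length), j < r → p s[j] = false)
    (h2 : ∀ j (hj : j < s.length), r ≤ j → j < m → p s[j] = true) :
    (s.take m).countP p = m - r := by
  have hsplit : s.take m = s.take r ++ (s.take m).drop r := by
    conv_lhs => rw [← List.take_append_drop r (s.take m)]
    rw [List.take_take, min_eq_left hr]
  rw [hsplit, List.countP_append]
  have c1 : (s.take r).countP p = 0 := by
    rw [List.countP_eq_zero]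
    intro x hx
    obtain ⟨i, hi, hxi⟩ := List.mem_iff_getElem.mp hx
    have hil : i < r := by simp at hi; omega
    have hisl : i < s.length := by simp at hi; omega
    have : (s.take r)[i] = s[i] := List.getElem_take
    rw [← hxi, this]
    simpa using h1 i hisl hil
  have hlen : (s.take m).length = m := by simp; omega
  have c2 : ((s.take m).drop r).countP p = m - r := by
    have hdl : ((s.take m).drop r).length = m - r := by simp [hlen]
    rw [List.countP_eq_length.mpr, hdl]
    intro x hx
    obtain ⟨i, hi, hxi⟩ := List.mem_iff_getElem.mp hx
    have hirm : r + i < m := by rw [hdl] at hi; omega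
    have hsl : r + i < s.length := by omega
    have e1 : ((s.take m).drop r)[i] = (s.take m)[r + i] := List.getElem_drop ..
    have e2 : (s.take m)[r + i]'(by omega) = s[r + i] := List.getElem_take
    rw [← hxi, e1, e2]
    exact h2 (r + i) hsl (by omega) hirm
  omega

-- ===== VERDICT (by name: the statement is the Claim_ definition above) =====
theorem electionsWinners_spec : Claim_equal_electionsWinners := by
  intro votes k _ hpre
  unfold Spec_electionsWinners electionsWinners electionsWinners_alt
  simp only []
  set s := PySem.List.sorted votes (fun x => x) with hsdef
  have hn : 2 ≤ s.length := by
    rw [hsdef, PySem.List.length_sorted]; exact hpre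
  set L := PySem.List.pyGetD s (-1) 0 with hL
  set c : Int := if L + k > PySem.List.pyGetD s (-2) 0 then 1 else 0 with hc
  have hpair : s.Pairwise (· ≤ ·) := PySem.List.sorted_pairwise votes (fun x => x)
  set m : Nat := s.length - 1 with hm
  have hmle : m ≤ s.length := by omega
  have hcast : ((s.length : Int) - 1) = ((m : Nat) : Int) := by omega
  rw [hcast, foldA_countP s k L c m hmle]
  set r : Nat := pvBsearch s (L - k) 0 m with hr
  have hinv := pvBsearch_inv s hpair (L - k) (m - 0) 0 m rfl hmle (by omega)
    (fun j hj hj0 => absurd hj0 (by omega))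
  rw [← hr] at hinv
  obtain ⟨-, hrm, hlow, hhigh⟩ := hinv
  have hcount : (s.take m).countP (fun x => decide (L < x + k)) = m - r := by
    apply countP_take_partition s _ m r hmle hrm
    · intro j hj hjr
      have := hlow j hj hjr
      simp; omega
    · intro j hj hrj hjm
      have := hhigh j hj hrj hjm
      simp; omega
  rw [hcount]
  omega
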